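-- pv_equiv track=rewrite | github.com/noah-yared/chess | chess.py | check_move
-- ===== SOURCE A (Python) =====
-- def squares_between(loc1, loc2):
--     x1, y1 = loc1; x2, y2 = loc2
--     dx, dy = x2-x1, y2-y1
--
--     if dx == 0:
--         if dy > 0:
--             return [(x1, y1+d+1) for d in range(dy)]
--         return [(x1, y1-d-1) for d in range(-dy)]
--     elif dy == 0:
--         if dx > 0:
--             return [(x1+d+1, y1) for d in range(dx)]
--         return [(x1-d-1, y1) for d in range(-dx)]
--     else:
--         diff = abs(dx)
--         if dx>0 and dy>0:
--             return [(x1+d+1, y1+d+1) for d in range(diff)]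
--         elif dx>0:
--             return [(x1+d+1, y1-d-1) for d in range(diff)]
--         elif dy>0:
--             return [(x1-d-1, y1+d+1) for d in range(diff)]
--         return [(x1-d-1, y1-d-1) for d in range(diff)]
--
-- def check_move(move, pieces):
--     x1, y1 = move[0]
--     x2, y2 = move[1]
--
--     if abs(x2-x1) == abs(y2-y1):
--         squares = squares_between(move[0], move[1])[:-1]
--         for square in squares:
--             if square in pieces[0] or square in pieces[1]:
--                 return False
--         return True
--     return False
-- ===== SOURCE B (Python) =====
-- def check_move(move, pieces):
--     (x1, y1), (x2, y2) = move
--     dx, dy = x2 - x1, y2 - y1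
--     n = abs(dx)
--     if n != abs(dy):
--         return False
--     if n < 2:
--         return True  # no intermediate squares on the diagonal
--     sx, sy = dx // n, dy // n
--
--     def blocks(p):
--         k = (p[0] - x1) * sx  # step index along the diagonal, if p is on it
--         return 0 < k < n and p[1] - y1 == k * sy
--
--     return not (any(map(blocks, pieces[0])) or any(map(blocks, pieces[1])))
-- ===== Notes on version B (the rewrite author's own statement) =====
-- stated objective: alternative
-- what changed: Inverts the loops: instead of walking every intermediate square and scanning both piece lists for each (O(|dx|*|pieces|)), B iterates once over the pieces and tests each arithmetically for lying on the open diagonal segment, so the walk over squares disappears.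
-- outside the precondition, e.g. on check_move(((0, 0), (2, 2)), [[(1, 1)]]): A returns False, B returns False
import Mathlib
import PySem

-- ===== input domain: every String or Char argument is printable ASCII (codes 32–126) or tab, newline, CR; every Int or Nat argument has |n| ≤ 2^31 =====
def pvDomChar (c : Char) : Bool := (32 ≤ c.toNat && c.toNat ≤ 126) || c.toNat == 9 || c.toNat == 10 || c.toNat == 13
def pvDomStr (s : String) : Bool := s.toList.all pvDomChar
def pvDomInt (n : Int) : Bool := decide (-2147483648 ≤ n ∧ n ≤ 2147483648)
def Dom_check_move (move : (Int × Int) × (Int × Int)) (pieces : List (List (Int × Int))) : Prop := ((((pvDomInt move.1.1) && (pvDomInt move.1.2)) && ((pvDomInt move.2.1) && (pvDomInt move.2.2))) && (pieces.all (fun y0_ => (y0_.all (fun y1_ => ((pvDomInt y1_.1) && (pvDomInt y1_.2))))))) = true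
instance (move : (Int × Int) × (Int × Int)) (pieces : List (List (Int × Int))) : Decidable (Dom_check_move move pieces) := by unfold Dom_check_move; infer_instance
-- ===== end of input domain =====

-- B inverts the loops: instead of walking every intermediate square and scanning both piece
-- lists for each, it iterates once over the pieces and tests each arithmetically for lying
-- on the open diagonal segment.


-- ===== PORT A =====
def squares_between (loc1 loc2 : Int × Int) : List (Int × Int) :=
  let x1 := loc1.1; let y1 := loc1.2
  let x2 := loc2.1; let y2 := loc2.2
  let dx := x2 - x1; let dy := y2 - y1
  if dx = 0 then
    if dy > 0 then (PySem.List.pyRange 0 dy 1).map (fun d => (x1, y1 + d + 1))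
    else (PySem.List.pyRange 0 (-dy) 1).map (fun d => (x1, y1 - d - 1))
  else if dy = 0 then
    if dx > 0 then (PySem.List.pyRange 0 dx 1).map (fun d => (x1 + d + 1, y1))
    else (PySem.List.pyRange 0 (-dx) 1).map (fun d => (x1 - d - 1, y1))
  else
    let diff := |dx|
    if dx > 0 ∧ dy > 0 then (PySem.List.pyRange 0 diff 1).map (fun d => (x1 + d + 1, y1 + d + 1))
    else if dx > 0 then (PySem.List.pyRange 0 diff 1).map (fun d => (x1 + d + 1, y1 - d - 1))
    else if dy > 0 then (PySem.List.pyRange 0 diff 1).map (fun d => (x1 - d - 1, y1 + d + 1))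
    else (PySem.List.pyRange 0 diff 1).map (fun d => (x1 - d - 1, y1 - d - 1))

-- the for-loop with early `return False`; pieces[0]/pieces[1] are read inside the loop body,
-- exactly as in Python (default [] is only reached outside Pre_check_move, where Python raises)
def scanA (pieces : List (List (Int × Int))) : List (Int × Int) → Bool
  | [] => true
  | s :: rest =>
    if (PySem.List.pyGetD pieces 0 []).contains s || (PySem.List.pyGetD pieces 1 []).contains s then false
    else scanA pieces rest

def check_move (move : (Int × Int) × (Int × Int)) (pieces : List (List (Int × Int))) : Bool :=
  let x1 := move.1.1; let y1 := move.1.2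
  let x2 := move.2.1; let y2 := move.2.2
  if |x2 - x1| = |y2 - y1| then
    let squares := PySem.List.slice (squares_between move.1 move.2) none (some (-1))
    scanA pieces squares
  else false

-- ===== PORT B =====
-- Source B's `blocks(p)`: is piece p on the open diagonal segment, at some step k with 0 < k < n?
def blocksB (x1 y1 sx sy n : Int) (p : Int × Int) : Bool :=
  let k := (p.1 - x1) * sx
  decide (0 < k) && decide (k < n) && decide (p.2 - y1 = k * sy)

def check_move_alt (move : (Int × Int) × (Int × Int)) (pieces : List (List (Int × Int))) : Bool :=
  let x1 := move.1.1; let y1 := move.1.2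
  let x2 := move.2.1; let y2 := move.2.2
  let dx := x2 - x1; let dy := y2 - y1
  let n := |dx|
  if n ≠ |dy| then false
  else if n < 2 then true
  else
    let sx := PySem.Int.floordiv dx n
    let sy := PySem.Int.floordiv dy n
    !((PySem.List.pyGetD pieces 0 []).any (blocksB x1 y1 sx sy n)
      || (PySem.List.pyGetD pieces 1 []).any (blocksB x1 y1 sx sy n))

-- ===== PRECONDITION & SPEC =====
-- Pre_ excludes piece lists with fewer than two sides combined with a diagonal move of length ≥ 2:
-- there both programs index pieces[0]/pieces[1] and in general raise IndexError (in the
-- accidental corner where a sole pieces[0] already holds a blocking square, both A and B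
-- still return False identically before touching pieces[1]).
def Pre_check_move (move : (Int × Int) × (Int × Int)) (pieces : List (List (Int × Int))) : Prop :=
  2 ≤ pieces.length ∨ ¬(|move.2.1 - move.1.1| = |move.2.2 - move.1.2| ∧ 2 ≤ |move.2.1 - move.1.1|)
instance (move : (Int × Int) × (Int × Int)) (pieces : List (List (Int × Int))) : Decidable (Pre_check_move move pieces) := by unfold Pre_check_move; infer_instance

def pvWitness_check_move : ((Int × Int) × (Int × Int)) × (List (List (Int × Int))) :=
  (((0, 0), (3, 3)), [[(2, 2)], [(5, 5)]])

def Spec_check_move (move : (Int × Int) × (Int × Int)) (pieces : List (List (Int × Int))) (out : Bool) : Prop := out = check_move_alt move pieces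
instance (move : (Int × Int) × (Int × Int)) (pieces : List (List (Int × Int))) (out : Bool) : Decidable (Spec_check_move move pieces out) := by unfold Spec_check_move; infer_instance

-- ===== CLAIM (what is proved, stated in full; the proofs are below) =====
def Claim_equal_check_move : Prop := ∀ (move : (Int × Int) × (Int × Int)) (pieces : List (List (Int × Int))), Dom_check_move move pieces → Pre_check_move move pieces → Spec_check_move move pieces (check_move move pieces)

-- ===== LEMMAS AND PROOFS =====

-- A's early-return scan is the negated `any` over the square list
lemma scanA_eq_any (pieces : List (List (Int × Int))) (l : List (Int × Int)) :
    scanA pieces l = !(l.any fun s =>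
      (PySem.List.pyGetD pieces 0 []).contains s || (PySem.List.pyGetD pieces 1 []).contains s) := by
  induction l with
  | nil => rfl
  | cons s rest ih =>
    simp only [scanA, List.any_cons]
    cases hc : ((PySem.List.pyGetD pieces 0 []).contains s
        || (PySem.List.pyGetD pieces 1 []).contains s)
    · rw [if_neg (by simp), ih, Bool.false_or]
    · rw [if_pos rfl, Bool.true_or, Bool.not_true]

lemma dropLast_map_pyRange {α : Type} (f : Int → α) (n : Int) (hn : 0 < n) :
    ((PySem.List.pyRange 0 n 1).map f).dropLast = (PySem.List.pyRange 0 (n - 1) 1).map f := by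
  rw [← List.map_dropLast]
  congr 1
  have h := PySem.List.pyRange_one_succ_right (a := 0) (b := n - 1) (by omega)
  rw [sub_add_cancel] at h
  rw [h, List.dropLast_concat]

-- the intermediate squares of A are the diagonal points at steps 1 … |dx|-1
lemma squares_eq (x1 y1 x2 y2 : Int) (h : |x2 - x1| = |y2 - y1|) :
    (squares_between (x1, y1) (x2, y2)).dropLast
      = (PySem.List.pyRange 1 |x2 - x1| 1).map
          (fun i => (x1 + i * ((if x2 - x1 > 0 then (1 : Int) else 0) - (if x2 - x1 < 0 then 1 else 0)),
                     y1 + i * ((if y2 - y1 > 0 then (1 : Int) else 0) - (if y2 - y1 < 0 then 1 else 0)))) := by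
  set dx := x2 - x1 with hdx
  set dy := y2 - y1 with hdy
  have hpos : dx ≠ 0 → 0 < |dx| := fun hne => abs_pos.mpr hne
  rcases lt_trichotomy dx 0 with hx | hx | hx
  · have hne : dy ≠ 0 := by intro h0; rw [h0, abs_zero, abs_eq_zero] at h; omega
    rcases lt_or_gt_of_ne hne with hy | hy
    · simp only [squares_between]
      rw [if_neg (by omega), if_neg (by omega), if_neg (by omega), if_neg (by omega),
          if_neg (by omega), dropLast_map_pyRange _ _ (hpos (by omega)),
          PySem.List.pyRange_one 0 (|dx| - 1), PySem.List.pyRange_one 1 |dx|,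
          List.map_map, List.map_map]
      simp only [sub_zero]
      apply List.map_congr_left
      intro k _
      simp only [Function.comp_apply]
      rw [if_neg (by omega), if_pos (by omega), if_neg (by omega), if_pos (by omega)]
      simp only [Prod.mk.injEq]
      constructor <;> ring
    · simp only [squares_between]
      rw [if_neg (by omega), if_neg (by omega), if_neg (by omega), if_neg (by omega),
          if_pos (by omega), dropLast_map_pyRange _ _ (hpos (by omega)),
          PySem.List.pyRange_one 0 (|dx| - 1), PySem.List.pyRange_one 1 |dx|,
          List.map_map, List.map_map]
      simp only [sub_zero]
      apply List.map_congr_left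
      intro k _
      simp only [Function.comp_apply]
      rw [if_neg (by omega), if_pos (by omega), if_pos (by omega), if_neg (by omega)]
      simp only [Prod.mk.injEq]
      constructor <;> ring
  · have hy : dy = 0 := by
      rw [hx, abs_zero] at h; have := abs_eq_zero.mp h.symm; omega
    have e1 : x2 - x1 = 0 := hx
    have e2 : y2 - y1 = 0 := hy
    simp [squares_between, e1, e2]
    rw [hx, abs_zero]
    exact PySem.List.pyRange_one_eq_nil (by omega)
  · have hne : dy ≠ 0 := by intro h0; rw [h0, abs_zero, abs_eq_zero] at h; omega
    rcases lt_or_gt_of_ne hne with hy | hy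
    · simp only [squares_between]
      rw [if_neg (by omega), if_neg (by omega), if_neg (by omega), if_pos (by omega),
          dropLast_map_pyRange _ _ (hpos (by omega)),
          PySem.List.pyRange_one 0 (|dx| - 1), PySem.List.pyRange_one 1 |dx|,
          List.map_map, List.map_map]
      simp only [sub_zero]
      apply List.map_congr_left
      intro k _
      simp only [Function.comp_apply]
      rw [if_pos (by omega), if_neg (by omega), if_neg (by omega), if_pos (by omega)]
      simp only [Prod.mk.injEq]
      constructor <;> ring
    · simp only [squares_between]
      rw [if_neg (by omega), if_neg (by omega), if_pos (by exact ⟨by omega, by omega⟩),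
          dropLast_map_pyRange _ _ (hpos (by omega)),
          PySem.List.pyRange_one 0 (|dx| - 1), PySem.List.pyRange_one 1 |dx|,
          List.map_map, List.map_map]
      simp only [sub_zero]
      apply List.map_congr_left
      intro k _
      simp only [Function.comp_apply]
      rw [if_pos (by omega), if_neg (by omega), if_pos (by omega), if_neg (by omega)]
      simp only [Prod.mk.injEq]
      constructor <;> ring

-- `any` distributes over a pointwise `||`
lemma any_or {α : Type} (l : List α) (f g : α → Bool) :
    (l.any fun s => f s || g s) = (l.any f || l.any g) := by
  induction l with
  | nil => rfl
  | cons a t ih =>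
    simp only [List.any_cons, ih]
    cases f a <;> cases g a <;> simp

-- for unit steps: some walked square lies in L  ↔  some piece of L blocks
lemma any_square_eq_any_blocks (L : List (Int × Int)) (x1 y1 sx sy n : Int)
    (hsx : sx = 1 ∨ sx = -1) (hsy : sy = 1 ∨ sy = -1) :
    ((PySem.List.pyRange 1 n 1).any fun i => L.contains (x1 + i * sx, y1 + i * sy))
      = L.any (blocksB x1 y1 sx sy n) := by
  rw [Bool.eq_iff_iff]
  simp only [List.any_eq_true, PySem.List.mem_pyRange_one, List.contains_iff_mem, blocksB,
    Bool.and_eq_true, decide_eq_true_eq]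
  constructor
  · rintro ⟨i, ⟨h1, h2⟩, hm⟩
    refine ⟨_, hm, ⟨?_, ?_⟩, ?_⟩ <;>
      rcases hsx with rfl | rfl <;> rcases hsy with rfl | rfl <;> simp <;> omega
  · rintro ⟨p, hm, ⟨h1, h2⟩, h3⟩
    refine ⟨(p.1 - x1) * sx, ⟨by omega, h2⟩, ?_⟩
    have hp1 : x1 + (p.1 - x1) * sx * sx = p.1 := by
      rcases hsx with rfl | rfl <;> ring
    have hp2 : y1 + (p.1 - x1) * sx * sy = p.2 := by omega
    rw [hp1, hp2]
    exact hm

-- the floor divisions dx // n, with |dx| = n ≥ 2, are exactly the step signs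
lemma floordiv_sign (d n : Int) (hn : 2 ≤ n) (hd : |d| = n) :
    PySem.Int.floordiv d n = (if d > 0 then (1 : Int) else 0) - (if d < 0 then 1 else 0) := by
  rcases abs_cases d with ⟨h1, h2⟩ | ⟨h1, h2⟩
  · rw [if_pos (by omega), if_neg (by omega),
        PySem.Int.floordiv_eq_iff_of_pos (by omega)]
    constructor <;> nlinarith
  · rw [if_neg (by omega), if_pos (by omega),
        PySem.Int.floordiv_eq_iff_of_pos (by omega)]
    constructor <;> nlinarith

-- the negated combined scan over walked squares equals B\'s negated piece scan
lemma not_any_comb (p0 p1 : List (Int × Int)) (x1 y1 sx sy n : Int)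
    (hsx : sx = 1 ∨ sx = -1) (hsy : sy = 1 ∨ sy = -1) :
    (!(((PySem.List.pyRange 1 n 1).map fun i => (x1 + i * sx, y1 + i * sy)).any
        fun s => p0.contains s || p1.contains s))
      = !(p0.any (blocksB x1 y1 sx sy n) || p1.any (blocksB x1 y1 sx sy n)) := by
  rw [List.any_map]
  rw [show ((fun s => p0.contains s || p1.contains s) ∘ fun i => (x1 + i * sx, y1 + i * sy))
        = fun i => p0.contains (x1 + i * sx, y1 + i * sy)
            || p1.contains (x1 + i * sx, y1 + i * sy) from rfl]
  rw [any_or, any_square_eq_any_blocks p0 x1 y1 sx sy n hsx hsy,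
      any_square_eq_any_blocks p1 x1 y1 sx sy n hsx hsy]

-- ===== VERDICT (by name: the statement is the Claim_ definition above) =====
theorem check_move_spec : Claim_equal_check_move := by
  intro move pieces _ _
  obtain ⟨⟨x1, y1⟩, ⟨x2, y2⟩⟩ := move
  simp only [Spec_check_move, check_move, check_move_alt]
  by_cases h : |x2 - x1| = |y2 - y1|
  · rw [if_pos h, if_neg (by simpa using h), PySem.List.slice_to_neg_one,
        scanA_eq_any, squares_eq x1 y1 x2 y2 h]
    by_cases hn : |x2 - x1| < 2
    · rw [if_pos hn, PySem.List.pyRange_one_eq_nil (by omega)]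
      rfl
    · rw [if_neg hn,
          floordiv_sign (x2 - x1) |x2 - x1| (by omega) rfl,
          floordiv_sign (y2 - y1) |x2 - x1| (by omega) h.symm]
      have hsx : ((if x2 - x1 > 0 then (1 : Int) else 0) - (if x2 - x1 < 0 then 1 else 0)) = 1
          ∨ ((if x2 - x1 > 0 then (1 : Int) else 0) - (if x2 - x1 < 0 then 1 else 0)) = -1 := by
        rcases abs_cases (x2 - x1) with ⟨ha1, ha2⟩ | ⟨ha1, ha2⟩ <;> split_ifs <;> omega
      have hsy : ((if y2 - y1 > 0 then (1 : Int) else 0) - (if y2 - y1 < 0 then 1 else 0)) = 1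
          ∨ ((if y2 - y1 > 0 then (1 : Int) else 0) - (if y2 - y1 < 0 then 1 else 0)) = -1 := by
        rcases abs_cases (y2 - y1) with ⟨hb1, hb2⟩ | ⟨hb1, hb2⟩ <;> split_ifs <;> omega
      exact not_any_comb _ _ _ _ _ _ _ hsx hsy
  · rw [if_neg h, if_pos (by simpa using h)]
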